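-- pv_equiv track=rewrite | github.com/wuxiaoshuchu/my-agent | context_engine.py | split_conversation_turns
-- ===== SOURCE A (Python) =====
-- from typing import Sequence
--
-- def split_conversation_turns(
--     messages: Sequence[dict[str, object]],
-- ) -> list[list[dict[str, object]]]:
--     turns: list[list[dict[str, object]]] = []
--     current: list[dict[str, object]] = []
--     for message in messages:
--         item = dict(message)
--         if item.get("role") == "user" and current:
--             turns.append(current)
--             current = [item]
--         else:
--             current.append(item)
--     if current:
--         turns.append(current)
--     return turns
-- ===== SOURCE B (Python) =====
-- from typing import Sequence
--
-- def split_conversation_turns(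
--     messages: Sequence[dict[str, object]],
-- ) -> list[list[dict[str, object]]]:
--     # Build the result back-to-front: scan messages in reverse; a message closes
--     # (i.e. a boundary lies after it) exactly when the message following it is a
--     # "user" message.  Turns and the messages inside each turn are accumulated in
--     # reverse order (so both appends are O(1)) and flipped once at the end.
--     rev_turns: list[list[dict[str, object]]] = []
--     for message in reversed(messages):
--         item = dict(message)
--         if rev_turns and rev_turns[-1][-1].get("role") == "user":
--             rev_turns.append([item])
--         elif rev_turns:
--             rev_turns[-1].append(item)
--         else:
--             rev_turns.append([item])
--     return [turn[::-1] for turn in reversed(rev_turns)]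
-- ===== Notes on version B (the rewrite author's own statement) =====
-- stated objective: alternative
-- what changed: B builds the turns back-to-front: it scans the messages in reverse and starts a new turn exactly when the previously processed (i.e. following) message has role 'user', instead of A's forward scan with a flush-on-user 'current' buffer; turns are accumulated reversed and flipped once at the end.
import Mathlib
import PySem

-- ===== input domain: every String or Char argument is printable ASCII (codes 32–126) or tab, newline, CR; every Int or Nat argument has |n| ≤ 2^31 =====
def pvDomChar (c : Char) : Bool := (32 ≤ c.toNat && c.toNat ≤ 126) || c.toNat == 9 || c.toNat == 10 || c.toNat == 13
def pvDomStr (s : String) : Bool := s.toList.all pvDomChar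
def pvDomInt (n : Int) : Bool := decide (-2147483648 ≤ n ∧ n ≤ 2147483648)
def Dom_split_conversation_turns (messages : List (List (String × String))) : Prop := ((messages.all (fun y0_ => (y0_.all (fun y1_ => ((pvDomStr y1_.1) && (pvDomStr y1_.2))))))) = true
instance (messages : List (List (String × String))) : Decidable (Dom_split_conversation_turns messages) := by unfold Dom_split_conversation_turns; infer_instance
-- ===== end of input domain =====

-- B builds the turns back-to-front (reverse scan, split when the following message is a "user"
-- message) instead of A's forward scan with a flush-on-user buffer; same O(n) cost (objective: alternative).


-- ===== PORT A =====
-- item = dict(message): rebuild the association list with Python's dict semantics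
def pvCopy (m : List (String × String)) : List (String × String) :=
  (PySem.Dict.ofList m).items

-- item.get("role") == "user"
def pvIsUser (m : List (String × String)) : Bool :=
  (PySem.Dict.mk m).get? "role" == some "user"

def split_conversation_turns (messages : List (List (String × String))) : List (List (List (String × String))) :=
  -- state = (turns, current)
  let st := messages.foldl
    (fun (st : List (List (List (String × String))) × List (List (String × String))) message =>
      let item := pvCopy message
      if pvIsUser item && !st.2.isEmpty then (st.1 ++ [st.2], [item])
      else (st.1, st.2 ++ [item]))
    ([], [])
  if !st.2.isEmpty then st.1 ++ [st.2] else st.1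

-- ===== PORT B =====
def split_conversation_turns_alt (messages : List (List (String × String))) : List (List (List (String × String))) :=
  -- for message in reversed(messages): …  (rev_turns[-1] / rev_turns[-1][-1] via getLast?;
  -- rev_turns' turns are never empty, so the `.getD []` default is never the looked-up value)
  let revTurns := messages.reverse.foldl
    (fun (acc : List (List (List (String × String)))) message =>
      let item := pvCopy message
      match acc.getLast? with
      | some t =>
        if pvIsUser (t.getLast?.getD []) then acc ++ [[item]]
        else acc.dropLast ++ [t ++ [item]]
      | none => acc ++ [[item]])
    []
  -- [turn[::-1] for turn in reversed(rev_turns)]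
  revTurns.reverse.map (fun t => (PySem.List.slice? t none none (-1)).getD [])

-- ===== PRECONDITION & SPEC =====
def Spec_split_conversation_turns (messages : List (List (String × String))) (out : List (List (List (String × String)))) : Prop := out = split_conversation_turns_alt messages
instance (messages : List (List (String × String))) (out : List (List (List (String × String)))) : Decidable (Spec_split_conversation_turns messages out) := by unfold Spec_split_conversation_turns; infer_instance

-- ===== CLAIM (what is proved, stated in full; the proofs are below) =====
def Claim_equal_split_conversation_turns : Prop := ∀ (messages : List (List (String × String))), Dom_split_conversation_turns messages → Spec_split_conversation_turns messages (split_conversation_turns messages)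

-- ===== LEMMAS AND PROOFS =====
-- does a (never-empty) turn start with a user message?
def pvHeadIsUser (t : List (List (String × String))) : Bool :=
  pvIsUser (t.head?.getD [])

-- reference back-to-front recursion: r l = the turns of l
def pvR (l : List (List (String × String))) : List (List (List (String × String))) :=
  match l with
  | [] => []
  | x :: xs =>
    match pvR xs with
    | [] => [[x]]
    | t :: ts => if pvHeadIsUser t then [x] :: t :: ts else (x :: t) :: ts

-- forward recursion extracted from A's loop (cur is the nonempty `current` buffer)
def pvH (cur : List (List (String × String))) (l : List (List (String × String))) : List (List (List (String × String))) :=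
  match l with
  | [] => [cur]
  | x :: xs => if pvIsUser x then cur :: pvH [x] xs else pvH (cur ++ [x]) xs

def pvCombine (cur : List (List (String × String))) (rl : List (List (List (String × String)))) : List (List (List (String × String))) :=
  match rl with
  | [] => [cur]
  | t :: ts => if pvHeadIsUser t then cur :: t :: ts else (cur ++ t) :: ts

-- A's plain loop step (copy already applied)
def pvStepA (st : List (List (List (String × String))) × List (List (String × String)))
    (x : List (String × String)) : List (List (List (String × String))) × List (List (String × String)) :=
  if pvIsUser x && !st.2.isEmpty then (st.1 ++ [st.2], [x]) else (st.1, st.2 ++ [x])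

def pvFin (st : List (List (List (String × String))) × List (List (String × String))) : List (List (List (String × String))) :=
  if !st.2.isEmpty then st.1 ++ [st.2] else st.1

-- B's plain loop step
def pvStepB (acc : List (List (List (String × String)))) (x : List (String × String)) : List (List (List (String × String))) :=
  match acc.getLast? with
  | some t => if pvIsUser (t.getLast?.getD []) then acc ++ [[x]] else acc.dropLast ++ [t ++ [x]]
  | none => acc ++ [[x]]

theorem pvR_cons_eq_combine (x : List (String × String)) (xs : List (List (String × String))) :
    pvR (x :: xs) = pvCombine [x] (pvR xs) := by
  cases h : pvR xs with
  | nil => simp [pvR, pvCombine, h]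
  | cons t ts => simp [pvR, pvCombine, h]

theorem pvH_eq_combine (l : List (List (String × String))) :
    ∀ cur, pvH cur l = pvCombine cur (pvR l) := by
  induction l with
  | nil => intro cur; simp [pvH, pvR, pvCombine]
  | cons x xs ih =>
    intro cur
    cases hu : pvIsUser x with
    | true =>
      rw [show pvH cur (x :: xs) = cur :: pvH [x] xs from by simp [pvH, hu], ih,
        ← pvR_cons_eq_combine]
      cases h : pvR xs with
      | nil => simp [pvR, pvCombine, h, pvHeadIsUser, hu]
      | cons t ts =>
        cases hut : pvIsUser (t.head?.getD []) with
        | true => simp [pvR, pvCombine, h, hut, pvHeadIsUser, hu]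
        | false => simp [pvR, pvCombine, h, hut, pvHeadIsUser, hu]
    | false =>
      rw [show pvH cur (x :: xs) = pvH (cur ++ [x]) xs from by simp [pvH, hu], ih]
      cases h : pvR xs with
      | nil => simp [pvR, pvCombine, h, pvHeadIsUser, hu]
      | cons t ts =>
        cases hut : pvIsUser (t.head?.getD []) with
        | true => simp [pvR, pvCombine, h, hut, pvHeadIsUser, hu]
        | false => simp [pvR, pvCombine, h, hut, pvHeadIsUser, hu]

-- A's loop invariant: starting from a nonempty buffer, the finalized fold is turns ++ pvH cur l
theorem pvFoldA (l : List (List (String × String))) :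
    ∀ turns cur, cur ≠ [] → pvFin (l.foldl pvStepA (turns, cur)) = turns ++ pvH cur l := by
  induction l with
  | nil => intro turns cur hc; simp [pvFin, pvH, hc]
  | cons x xs ih =>
    intro turns cur hc
    by_cases hu : pvIsUser x
    · have hstep : pvStepA (turns, cur) x = (turns ++ [cur], [x]) := by
        simp [pvStepA, hu, hc]
      rw [List.foldl_cons, hstep, ih _ [x] (by simp)]
      simp [pvH, hu]
    · have hstep : pvStepA (turns, cur) x = (turns, cur ++ [x]) := by
        simp [pvStepA, hu]
      rw [List.foldl_cons, hstep, ih _ (cur ++ [x]) (by simp)]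
      simp [pvH, hu]

-- B's loop computes pvR, stored doubly reversed
theorem pvFoldB (l : List (List (String × String))) :
    l.foldr (fun x acc => pvStepB acc x) [] = ((pvR l).map List.reverse).reverse := by
  induction l with
  | nil => simp [pvR]
  | cons x xs ih =>
    simp only [List.foldr_cons, ih]
    cases h : pvR xs with
    | nil => simp [pvStepB, pvR, h]
    | cons t ts =>
      cases hut : pvHeadIsUser t with
      | true =>
        have hu' : pvIsUser (t.head?.getD []) = true := hut
        simp [pvStepB, pvR, h, hut, hu']
      | false =>
        have hu' : pvIsUser (t.head?.getD []) = false := hut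
        simp [pvStepB, pvR, h, hut, hu']

theorem pvA_fold (messages : List (List (String × String))) :
    split_conversation_turns messages = pvFin ((messages.map pvCopy).foldl pvStepA ([], [])) := by
  rw [List.foldl_map]; rfl

theorem pvB_fold (messages : List (List (String × String))) :
    split_conversation_turns_alt messages =
      ((messages.map pvCopy).foldr (fun x acc => pvStepB acc x) []).reverse.map
        (fun t => (PySem.List.slice? t none none (-1)).getD []) := by
  rw [← List.foldl_reverse, ← List.map_reverse, List.foldl_map]; rfl

theorem pvA_eq_pvR (messages : List (List (String × String))) :
    split_conversation_turns messages = pvR (messages.map pvCopy) := by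
  rw [pvA_fold]
  cases hm : messages.map pvCopy with
  | nil => simp [pvR, pvFin]
  | cons m ms =>
    have h0 : pvStepA (([] : List (List (List (String × String)))), []) m = ([], [m]) := by
      simp [pvStepA]
    rw [List.foldl_cons, h0, pvFoldA ms [] [m] (by simp), pvH_eq_combine,
      ← pvR_cons_eq_combine]
    simp

theorem pvB_eq_pvR (messages : List (List (String × String))) :
    split_conversation_turns_alt messages = pvR (messages.map pvCopy) := by
  rw [pvB_fold, pvFoldB]
  simp [PySem.List.slice?_none_none_neg_one, List.map_map]

-- ===== VERDICT (by name: the statement is the Claim_ definition above) =====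
theorem split_conversation_turns_spec : Claim_equal_split_conversation_turns := by
  intro messages _
  unfold Spec_split_conversation_turns
  rw [pvA_eq_pvR, pvB_eq_pvR]
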